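-- pv_equiv track=rewrite | github.com/PremModhaOfficial/mps-textgen-parser | parse_textgen.py | expand_escapes
-- ===== SOURCE A (Python) =====
-- def expand_escapes(text):
--     r"""Split constant text on \n into parts. Convert \t to real tab.
--
--     Returns [('text', str) | ('newline', None), ...]
--     """
--     parts = []
--     chunks = text.split('\\n')
--     for idx, chunk in enumerate(chunks):
--         if chunk:
--             parts.append(('text', chunk.replace('\\t', '\t')))
--         if idx < len(chunks) - 1:
--             parts.append(('newline', None))
--     return parts
-- ===== SOURCE B (Python) =====
-- def expand_escapes(text):
--     r"""Single-pass character scanner: split on \n, convert \t, emit tokens."""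
--     parts = []
--     buf = []
--     i = 0
--     n = len(text)
--     while i < n:
--         c = text[i]
--         if c == '\\' and i + 1 < n and text[i + 1] == 'n':
--             if buf:
--                 parts.append(('text', ''.join(buf)))
--                 buf = []
--             parts.append(('newline', None))
--             i += 2
--         elif c == '\\' and i + 1 < n and text[i + 1] == 't':
--             buf.append('\t')
--             i += 2
--         else:
--             buf.append(c)
--             i += 1
--     if buf:
--         parts.append(('text', ''.join(buf)))
--     return parts
-- ===== Notes on version B (the rewrite author's own statement) =====
-- stated objective: alternative
-- what changed: Replaces the split-on-escaped-newline plus per-chunk escaped-tab replacement plus enumerate loop over the chunk list by a single left-to-right character scanner that keeps a pending text buffer and emits tokens in one pass, with no intermediate chunk list.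
import Mathlib
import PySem

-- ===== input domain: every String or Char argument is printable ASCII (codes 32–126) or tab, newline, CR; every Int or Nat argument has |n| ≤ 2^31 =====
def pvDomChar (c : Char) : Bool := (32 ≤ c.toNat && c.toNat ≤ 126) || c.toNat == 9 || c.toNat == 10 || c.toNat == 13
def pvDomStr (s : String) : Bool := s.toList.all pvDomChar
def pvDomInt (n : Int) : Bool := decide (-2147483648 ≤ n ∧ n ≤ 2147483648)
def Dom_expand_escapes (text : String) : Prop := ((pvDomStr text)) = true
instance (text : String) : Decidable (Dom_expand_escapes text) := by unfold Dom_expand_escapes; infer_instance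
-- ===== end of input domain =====

-- B replaces A's split on the escaped-newline sequence + per-chunk escaped-tab replacement + indexed loop by a single left-to-right
-- character scanner with a pending text buffer (one pass, no intermediate chunk list); objective: alternative.

-- ===== PORT A =====
-- literal port of A: split on the escaped-newline sequence, enumerate the chunks, emit a text token
-- (with the escaped-tab sequence replaced by a real tab) for each non-empty chunk and a newline token after each non-last chunk
def expand_escapes (text : String) : List (String × Option String) :=
  let chunks := PySem.Chars.splitOn text.toList ['\\', 'n']
  (PySem.List.enumerate chunks).foldl
    (fun parts ic =>
      let parts' :=
        if ic.2 ≠ [] then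
          parts ++ [(("text" : String), some (String.ofList (PySem.Chars.replace ic.2 ['\\', 't'] ['\t'])))]
        else parts
      if ic.1 < (chunks.length : Int) - 1 then
        parts' ++ [(("newline" : String), (none : Option String))]
      else parts') []

-- ===== PORT B =====
-- B's scanner loop: buf is the pending text buffer (kept reversed), parts the emitted tokens
def altGo : List Char → List Char → List (String × Option String) → List (String × Option String)
  | [], buf, parts =>
      if buf ≠ [] then parts ++ [(("text" : String), some (String.ofList buf.reverse))] else parts
  | '\\' :: 'n' :: r, buf, parts =>
      altGo r []
        ((if buf ≠ [] then parts ++ [(("text" : String), some (String.ofList buf.reverse))] else parts)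
          ++ [(("newline" : String), (none : Option String))])
  | '\\' :: 't' :: r, buf, parts => altGo r ('\t' :: buf) parts
  | c :: r, buf, parts => altGo r (c :: buf) parts

def expand_escapes_alt (text : String) : List (String × Option String) :=
  altGo text.toList [] []

-- ===== PRECONDITION & SPEC =====
def Spec_expand_escapes (text : String) (out : List (String × Option String)) : Prop := out = expand_escapes_alt text
instance (text : String) (out : List (String × Option String)) : Decidable (Spec_expand_escapes text out) := by unfold Spec_expand_escapes; infer_instance

-- ===== CLAIM (what is proved, stated in full; the proofs are below) =====
def Claim_equal_expand_escapes : Prop := ∀ (text : String), Dom_expand_escapes text → Spec_expand_escapes text (expand_escapes text)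

-- ===== LEMMAS AND PROOFS =====

-- reference split on the two-char escaped-newline separator: (head chunk, remaining chunks)
def msplit : List Char → List Char × List (List Char)
  | [] => ([], [])
  | '\\' :: 'n' :: r => ([], (msplit r).1 :: (msplit r).2)
  | c :: r => (c :: (msplit r).1, (msplit r).2)

-- reference replacement of the two-char escaped-tab sequence by a real tab
def mrep : List Char → List Char
  | [] => []
  | '\\' :: 't' :: r => '\t' :: mrep r
  | c :: r => c :: mrep r

def tok (s : List Char) : List (String × Option String) :=
  if s ≠ [] then [(("text" : String), some (String.ofList s))] else []

-- tokens of a first (already tab-replaced) chunk followed by the raw remaining chunks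
def jn : List Char → List (List Char) → List (String × Option String)
  | first, [] => tok first
  | first, c :: rest => tok first ++ (("newline" : String), (none : Option String)) :: jn (mrep c) rest

-- A's loop body with the chunk-count bound abstracted as N
def fstep (N : Int) (parts : List (String × Option String)) (ic : Int × List Char) :
    List (String × Option String) :=
  let parts' :=
    if ic.2 ≠ [] then
      parts ++ [(("text" : String), some (String.ofList (PySem.Chars.replace ic.2 ['\\', 't'] ['\t'])))]
    else parts
  if ic.1 < N - 1 then
    parts' ++ [(("newline" : String), (none : Option String))]
  else parts'

theorem mrep_cons (c : Char) (r : List Char) (h : ¬(c = '\\' ∧ r.head? = some 't')) :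
    mrep (c :: r) = c :: mrep r := by
  rw [mrep.eq_def]
  split
  · simp_all
  · rename_i heq; injection heq with h1 h2; subst h1 h2; exact absurd ⟨rfl, rfl⟩ h
  · rename_i hne heq; injection heq with h1 h2; subst h1 h2; rfl

theorem mrep_eq_nil (s : List Char) : mrep s = [] ↔ s = [] := by
  induction s using mrep.induct with
  | case1 => simp [mrep]
  | case2 r ih => simp [mrep]
  | case3 c r hne ih =>
    rw [mrep_cons c r]
    · simp
    · rintro ⟨rfl, hh⟩
      rcases r with _ | ⟨c2, r⟩
      · simp at hh
      · simp at hh; subst hh; exact hne r rfl rfl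

theorem msplit_cons (c : Char) (r : List Char) (h : ¬(c = '\\' ∧ r.head? = some 'n')) :
    msplit (c :: r) = (c :: (msplit r).1, (msplit r).2) := by
  rw [msplit.eq_def]
  split
  · simp_all
  · rename_i heq; injection heq with h1 h2; subst h1 h2; exact absurd ⟨rfl, rfl⟩ h
  · rename_i hne heq; injection heq with h1 h2; subst h1 h2; rfl

theorem msplit_head (r : List Char) : (msplit r).1 = [] ∨ (msplit r).1.head? = r.head? := by
  rcases r with _ | ⟨c, r⟩
  · left; simp [msplit]
  · by_cases h : c = '\\' ∧ r.head? = some 'n'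
    · obtain ⟨rfl, hh⟩ := h
      rcases r with _ | ⟨c2, r⟩
      · simp at hh
      · simp at hh; subst hh; left; simp [msplit]
    · rw [msplit_cons c r h]; right; simp

theorem rep_go (fuel : Nat) : ∀ (l acc : List Char), l.length ≤ fuel →
    PySem.Chars.replace.go ['\\', 't'] ['\t'] fuel l acc = acc.reverse ++ mrep l := by
  induction fuel with
  | zero =>
    intro l acc h
    rw [List.length_eq_zero_iff.mp (Nat.le_zero.mp h)]
    rw [PySem.Chars.replace.go.eq_def]
    simp [mrep]
  | succ fuel ih =>
    intro l acc h
    rw [PySem.Chars.replace.go.eq_def]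
    rcases l with _ | ⟨c, t⟩
    · simp [mrep]
    · dsimp only
      by_cases hp : ['\\', 't'].isPrefixOf (c :: t) = true
      · rw [if_pos hp]
        obtain ⟨rest, hrest⟩ := List.isPrefixOf_iff_prefix.mp hp
        simp only [List.cons_append, List.nil_append] at hrest
        injection hrest with h1 h2; subst h1; subst h2
        rw [ih _ _ (by simp at h ⊢; omega)]
        simp [mrep]
      · rw [if_neg hp]
        rw [ih _ _ (by simp at h ⊢; omega)]
        rw [mrep_cons c t]
        · simp
        · rintro ⟨rfl, hh⟩
          rcases t with _ | ⟨c2, t⟩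
          · simp at hh
          · simp at hh; subst hh
            exact hp (List.isPrefixOf_iff_prefix.mpr ⟨t, rfl⟩)

theorem rep_eq (l : List Char) : PySem.Chars.replace l ['\\', 't'] ['\t'] = mrep l := by
  rw [PySem.Chars.replace]
  rw [if_neg (by simp)]
  simpa using rep_go l.length l [] le_rfl

theorem split_go (fuel : Nat) : ∀ (l cur : List Char) (acc : List (List Char)), l.length < fuel →
    PySem.Chars.splitOn.go ['\\', 'n'] fuel l cur acc
      = acc.reverse ++ ((cur.reverse ++ (msplit l).1) :: (msplit l).2) := by
  induction fuel with
  | zero => intro l cur acc h; exact absurd h (by omega)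
  | succ fuel ih =>
    intro l cur acc h
    rw [PySem.Chars.splitOn.go.eq_def]
    rcases l with _ | ⟨c, t⟩
    · simp [msplit]
    · dsimp only
      by_cases hp : ['\\', 'n'].isPrefixOf (c :: t) = true
      · rw [if_pos hp]
        obtain ⟨rest, hrest⟩ := List.isPrefixOf_iff_prefix.mp hp
        simp only [List.cons_append, List.nil_append] at hrest
        injection hrest with h1 h2; subst h1; subst h2
        rw [ih _ _ _ (by simp at h ⊢; omega)]
        simp [msplit]
      · rw [if_neg hp]
        rw [ih _ _ _ (by simp at h ⊢; omega)]
        rw [msplit_cons c t]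
        · simp
        · rintro ⟨rfl, hh⟩
          rcases t with _ | ⟨c2, t⟩
          · simp at hh
          · simp at hh; subst hh
            exact hp (List.isPrefixOf_iff_prefix.mpr ⟨t, rfl⟩)

theorem split_eq (l : List Char) :
    PySem.Chars.splitOn l ['\\', 'n'] = (msplit l).1 :: (msplit l).2 := by
  rw [PySem.Chars.splitOn]
  simpa using split_go (l.length + 1) l [] [] (by omega)

theorem enum_cons {α : Type} (x : α) (t : List α) (k : Int) :
    PySem.List.enumerate (x :: t) k = (k, x) :: PySem.List.enumerate t (k + 1) := by
  simp [PySem.List.enumerate]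

theorem fstep_eval (N : Int) (parts : List (String × Option String)) (k : Int) (c : List Char) :
    fstep N parts (k, c)
      = (parts ++ tok (mrep c)) ++ (if k < N - 1 then [(("newline" : String), (none : Option String))] else []) := by
  rw [fstep]
  by_cases hc : c = []
  · subst hc
    simp only [ne_eq, not_true_eq_false, if_false, tok, mrep]
    split <;> simp
  · simp only [ne_eq, hc, not_false_eq_true, if_true, rep_eq, tok,
      (mrep_eq_nil c).not.mpr hc]
    split <;> simp

theorem fold_eq (N : Int) : ∀ (t : List (List Char)) (first : List Char) (k : Int)
    (acc : List (String × Option String)), k + 1 + t.length = N →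
    (PySem.List.enumerate (first :: t) k).foldl (fstep N) acc = acc ++ jn (mrep first) t := by
  intro t
  induction t with
  | nil =>
    intro first k acc h
    simp only [List.length_nil, Nat.cast_zero, add_zero] at h
    rw [enum_cons, List.foldl_cons, PySem.List.enumerate, List.foldl_nil, fstep_eval]
    rw [if_neg (by omega), jn]
    simp
  | cons c rest ih =>
    intro first k acc h
    simp only [List.length_cons] at h
    rw [enum_cons, List.foldl_cons, ih c (k + 1) _ (by push_cast at h ⊢; omega), fstep_eval]
    rw [if_pos (by push_cast at h ⊢; omega), jn]
    simp

theorem altGo_eq (cs buf : List Char) (parts : List (String × Option String)) :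
    altGo cs buf parts = parts ++ jn (buf.reverse ++ mrep (msplit cs).1) ((msplit cs).2) := by
  induction cs, buf, parts using altGo.induct with
  | case1 buf parts hb =>
    simp only [altGo, if_pos hb, msplit, mrep, jn, List.append_nil, tok]
    rw [if_pos (by simpa using hb)]
  | case2 buf parts hb =>
    simp only [not_not] at hb; subst hb
    simp [altGo, msplit, mrep, jn, tok]
  | case3 r buf parts ih =>
    rw [altGo, ih]
    simp only [msplit, mrep, jn, List.append_nil]
    rw [tok]
    by_cases hb : buf = []
    · subst hb; simp
    · rw [if_pos hb, if_pos (by simpa using hb)]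
      simp
  | case4 r buf parts ih =>
    rw [altGo, ih]
    have h1 : msplit ('\\' :: 't' :: r) = ('\\' :: 't' :: (msplit r).1, (msplit r).2) := by
      rw [msplit_cons '\\' ('t' :: r) (by simp), msplit_cons 't' r (by simp)]
    rw [h1]
    have h2 : mrep ('\\' :: 't' :: (msplit r).1) = '\t' :: mrep (msplit r).1 := by
      simp [mrep]
    simp [h2]
  | case5 c r buf parts hn ht ih =>
    have hmn : ¬(c = '\\' ∧ r.head? = some 'n') := by
      rintro ⟨rfl, hh⟩
      rcases r with _ | ⟨c2, r⟩
      · simp at hh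
      · simp at hh; subst hh; exact hn r rfl rfl
    have hmt : ¬(c = '\\' ∧ (msplit r).1.head? = some 't') := by
      rintro ⟨rfl, hh⟩
      rcases msplit_head r with h0 | h0
      · rw [h0] at hh; simp at hh
      · rw [h0] at hh
        rcases r with _ | ⟨c2, r⟩
        · simp at hh
        · simp at hh; subst hh; exact ht r rfl rfl
    have hL : altGo (c :: r) buf parts = altGo r (c :: buf) parts := by
      rw [altGo.eq_def]
      split
      · rename_i heq; exact absurd heq (by simp)
      · rename_i heq; injection heq with h1 h2; subst h1 h2
        exact (hmn ⟨rfl, by simp⟩).elim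
      · rename_i heq; injection heq with h1 h2; subst h1 h2
        exact (ht _ rfl rfl).elim
      · rename_i heq; injection heq with h1 h2; subst h1 h2; rfl
    rw [hL, ih, msplit_cons c r hmn]
    rw [show mrep (c :: (msplit r).1) = c :: mrep (msplit r).1 from mrep_cons c _ hmt]
    simp

-- ===== VERDICT (by name: the statement is the Claim_ definition above) =====
theorem expand_escapes_spec : Claim_equal_expand_escapes := by
  intro text _
  show expand_escapes text = expand_escapes_alt text
  have hA : expand_escapes text
      = List.foldl (fstep ((PySem.Chars.splitOn text.toList ['\\', 'n']).length : Int)) []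
          (PySem.List.enumerate (PySem.Chars.splitOn text.toList ['\\', 'n']) 0) := rfl
  rw [hA, split_eq]
  rw [fold_eq _ _ _ _ _ (by push_cast [List.length_cons]; omega)]
  rw [expand_escapes_alt, altGo_eq]
  simp
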